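-- pv_equiv track=rewrite | github.com/peachymrz/aoc2023 | day3/task3a.py | findNums
-- ===== SOURCE A (Python) =====
-- def findNums(line):
--     result = []
--     pos = -1
--     len = -1
--     for cidx, c in enumerate(line):
--         if c.isdigit():
--             if pos < 0:
--                 pos = cidx
--                 len = 1
--             else:
--                 len += 1
--         else:
--             if pos >= 0:
--                 result.append((pos, len))
--             pos = -1
--             len = -1
--     # if a number is at end of line
--     if pos >= 0:
--         result.append((pos, len))
--     return result
-- ===== SOURCE B (Python) =====
-- def findNums(line):
--     result = []
--     i = 0
--     n = len(line)
--     while i < n: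
--         k = line[i].isdigit()
--         j = i + 1
--         while j < n and line[j].isdigit() == k:
--             j += 1
--         if k:
--             result.append((i, j - i))
--         i = j
--     return result
-- ===== Notes on version B (the rewrite author's own statement) =====
-- stated objective: alternative
-- what changed: Replaced the per-character pos/len state machine (with sentinel resets and an end-of-line flush) by run-grouping: a two-pointer scan that splits the string into maximal runs of equal isdigit() key and records (start, length) for digit runs.
import Mathlib
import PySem

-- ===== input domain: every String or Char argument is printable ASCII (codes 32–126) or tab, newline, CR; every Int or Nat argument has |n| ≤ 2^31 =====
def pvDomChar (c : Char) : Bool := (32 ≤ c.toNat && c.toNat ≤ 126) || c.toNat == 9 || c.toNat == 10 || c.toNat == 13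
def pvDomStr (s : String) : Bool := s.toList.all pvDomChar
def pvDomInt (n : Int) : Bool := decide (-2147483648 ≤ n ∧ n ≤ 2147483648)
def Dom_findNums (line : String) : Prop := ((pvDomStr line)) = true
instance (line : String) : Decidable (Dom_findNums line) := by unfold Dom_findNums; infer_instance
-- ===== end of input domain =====

-- B replaces A's per-character pos/len state machine by a run-grouping scan over maximal
-- equal-isdigit runs (alternative decomposition, same O(n) cost).

-- ===== PORT A =====
-- one step of A's for-loop: state (result, pos, len), item (cidx, c)
def pvStepA (s : List (Int × Int) × Int × Int) (p : Int × Char) : List (Int × Int) × Int × Int :=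
  if PySem.Chars.isdigit p.2 then
    if s.2.1 < 0 then (s.1, p.1, 1) else (s.1, s.2.1, s.2.2 + 1)
  else
    if s.2.1 ≥ 0 then (s.1 ++ [(s.2.1, s.2.2)], -1, -1) else (s.1, -1, -1)

def findNums (line : String) : List (Int × Int) :=
  let st := (PySem.List.enumerate line.toList).foldl pvStepA ([], -1, -1)
  if st.2.1 ≥ 0 then st.1 ++ [(st.2.1, st.2.2)] else st.1

-- ===== PORT B =====
-- skip the maximal run sharing the first char's isdigit key; i is the run's start index
def pvRunsB (i : Int) : List Char → List (Int × Int)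
  | [] => []
  | c :: cs =>
    let k := PySem.Chars.isdigit c
    let run := cs.takeWhile (fun d => PySem.Chars.isdigit d == k)
    let n : Int := 1 + run.length
    (if k then [(i, n)] else []) ++ pvRunsB (i + n) (cs.dropWhile (fun d => PySem.Chars.isdigit d == k))
termination_by l => l.length
decreasing_by simpa using Nat.lt_succ_of_le (List.length_dropWhile_le _ _)

def findNums_alt (line : String) : List (Int × Int) := pvRunsB 0 line.toList

-- ===== PRECONDITION & SPEC =====
def Spec_findNums (line : String) (out : List (Int × Int)) : Prop := out = findNums_alt line
instance (line : String) (out : List (Int × Int)) : Decidable (Spec_findNums line out) := by unfold Spec_findNums; infer_instance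

-- ===== CLAIM (what is proved, stated in full; the proofs are below) =====
def Claim_equal_findNums : Prop := ∀ (line : String), Dom_findNums line → Spec_findNums line (findNums line)

-- ===== LEMMAS AND PROOFS =====

-- A's final flush: emit the pending run, if any
def pvFinish (st : List (Int × Int) × Int × Int) : List (Int × Int) :=
  if st.2.1 ≥ 0 then st.1 ++ [(st.2.1, st.2.2)] else st.1

-- a leading non-digit char only shifts B's offset by one
lemma pvRunsB_nondigit (j : Int) (r : Char) (rs : List Char)
    (h : PySem.Chars.isdigit r = false) : pvRunsB j (r :: rs) = pvRunsB (j + 1) rs := by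
  cases rs with
  | nil => simp [pvRunsB, h]
  | cons s ss =>
    by_cases hs : PySem.Chars.isdigit s = true
    · simp [pvRunsB, h, hs]
    · simp only [Bool.not_eq_true] at hs
      simp only [pvRunsB, h, hs, List.takeWhile_cons, List.dropWhile_cons,
        beq_self_eq_true, if_true, List.length_cons, Bool.false_eq_true, if_false,
        List.nil_append]
      norm_num
      ring_nf

-- A's fold over an all-digit segment just extends the current run
lemma foldA_digits (ds : List Char) (h : ∀ d ∈ ds, PySem.Chars.isdigit d = true) :
    ∀ (i : Int) (res : List (Int × Int)) (p m : Int), 0 ≤ p →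
      (PySem.List.enumerate ds i).foldl pvStepA (res, p, m) = (res, p, m + ds.length) := by
  induction ds with
  | nil => intro i res p m _; simp [PySem.List.enumerate_nil]
  | cons d ds ih =>
    intro i res p m hp
    have hd : PySem.Chars.isdigit d = true := h d (by simp)
    have hnot : ¬ p < 0 := by omega
    rw [PySem.List.enumerate_cons]
    simp only [List.foldl_cons, pvStepA, hd, if_true, hnot, if_false]
    rw [ih (fun x hx => h x (by simp [hx])) (i + 1) res p (m + 1) hp]
    simp only [List.length_cons]
    push_cast
    ring_nf

lemma head_dropWhile_false (p : Char → Bool) (l rs : List Char) (r : Char)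
    (h : l.dropWhile p = r :: rs) : p r = false := by
  have hl : 0 < (l.dropWhile p).length := by simp [h]
  have h0 := List.dropWhile_get_zero_not p l hl
  simp only [List.get_eq_getElem, h] at h0
  simpa using h0

-- main invariant: A's fold from a fresh state, then flushed, equals res ++ B's runs
lemma mainA (N : Nat) : ∀ (cs : List Char), cs.length ≤ N → ∀ (i : Int), 0 ≤ i →
    ∀ (res : List (Int × Int)),
      pvFinish ((PySem.List.enumerate cs i).foldl pvStepA (res, -1, -1)) = res ++ pvRunsB i cs := by
  induction N with
  | zero =>
    intro cs hcs i hi res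
    have : cs = [] := List.length_eq_zero_iff.mp (Nat.le_zero.mp hcs)
    subst this
    simp [PySem.List.enumerate_nil, pvRunsB, pvFinish]
  | succ N ih =>
    intro cs hcs i hi res
    cases cs with
    | nil => simp [PySem.List.enumerate_nil, pvRunsB, pvFinish]
    | cons c cs' =>
      have hstep1 : pvStepA (res, -1, -1) (i, c) = if PySem.Chars.isdigit c then (res, i, 1) else (res, -1, -1) := by
        simp [pvStepA]
      by_cases hk : PySem.Chars.isdigit c = true
      · -- digit run
        set run := cs'.takeWhile (fun d => PySem.Chars.isdigit d) with hrun
        set rest := cs'.dropWhile (fun d => PySem.Chars.isdigit d) with hrest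
        clear_value run rest
        have hsplit : run ++ rest = cs' := by
          rw [hrun, hrest]; exact List.takeWhile_append_dropWhile
        have hrundig : ∀ d ∈ run, PySem.Chars.isdigit d = true := by
          intro d hd
          exact List.mem_takeWhile_imp (hrun ▸ hd)
        have hBrun : pvRunsB i (c :: cs') =
            (i, 1 + (run.length : Int)) :: pvRunsB (i + (1 + run.length)) rest := by
          rw [pvRunsB]
          simp [hk, ← hrun, ← hrest]
        have hfold : (PySem.List.enumerate (c :: cs') i).foldl pvStepA (res, -1, -1)
            = (PySem.List.enumerate rest (i + 1 + run.length)).foldl pvStepA (res, i, 1 + run.length) := by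
          conv_lhs => rw [← hsplit]
          rw [PySem.List.enumerate_cons, PySem.List.enumerate_append]
          simp only [List.foldl_cons, List.foldl_append, hstep1, hk, if_true]
          rw [foldA_digits run hrundig (i + 1) res i 1 hi]
        rw [hfold, hBrun]
        cases hre : rest with
        | nil =>
          simp [PySem.List.enumerate_nil, pvFinish, pvRunsB, hi]
        | cons r rs =>
          have hr : PySem.Chars.isdigit r = false :=
            head_dropWhile_false _ cs' rs r (by rw [← hrest, hre])
          have hstep2 : pvStepA (res, i, 1 + (run.length : Int)) (i + 1 + run.length, r)
              = (res ++ [(i, 1 + (run.length : Int))], -1, -1) := by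
            simp [pvStepA, hr, hi]
          have hrs : rs.length ≤ N := by
            have h1 : cs'.length = run.length + (r :: rs).length := by
              rw [← hsplit, hre]; simp
            simp only [List.length_cons] at hcs h1
            omega
          rw [PySem.List.enumerate_cons]
          simp only [List.foldl_cons]
          rw [hstep2, ih rs hrs (i + 1 + run.length + 1) (by positivity) (res ++ [(i, 1 + (run.length : Int))]),
            pvRunsB_nondigit _ r rs hr]
          have : i + (1 + (run.length : Int)) + 1 = i + 1 + run.length + 1 := by ring
          rw [this]
          simp
      · -- non-digit head: A stays fresh, B shifts by one
        simp only [Bool.not_eq_true] at hk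
        rw [PySem.List.enumerate_cons]
        simp only [List.foldl_cons, hstep1, hk, Bool.false_eq_true, if_false]
        rw [ih cs' (by simpa using Nat.le_of_succ_le_succ hcs) (i + 1) (by omega) res,
          pvRunsB_nondigit i c cs' hk]

-- ===== VERDICT (by name: the statement is the Claim_ definition above) =====
theorem findNums_spec : Claim_equal_findNums := by
  intro line _
  unfold Spec_findNums findNums findNums_alt
  simpa [pvFinish] using mainA line.toList.length line.toList le_rfl 0 le_rfl []
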